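-- pv_equiv track=rewrite | github.com/cafe3310/public-agent-skills | skills/im-local-kb/workflows/02_gap_check/SCRIPT_analyze_gaps.py | get_non_blank_context
-- ===== SOURCE A (Python) =====
-- def get_non_blank_context(lines, start_idx, direction='backward', count=3):
--     """
--     Helper to find N non-blank lines in a specific direction.
--     direction='backward': searches from start_idx upwards (inclusive of start_idx).
--     direction='forward': searches from start_idx downwards (inclusive of start_idx).
--     """
--     result = []
--     curr = start_idx
--
--     while len(result) < count:
--         if curr < 0 or curr >= len(lines):
--             break
--
--         line = lines[curr].strip()
--         if line:
--             result.append(line)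
--
--         if direction == 'backward':
--             curr -= 1
--         else:
--             curr += 1
--
--     if direction == 'backward':
--         result.reverse()
--
--     return "\n".join(result)
-- ===== SOURCE B (Python) =====
-- def get_non_blank_context(lines, start_idx, direction='backward', count=3):
--     """Strip everything once, filter blanks in the directional region, slice count positionally."""
--     if not (0 <= start_idx < len(lines)) or count <= 0:
--         return ""
--     stripped = [ln.strip() for ln in lines]
--     if direction == 'backward':
--         picked = [s for s in stripped[:start_idx + 1] if s][-count:]
--     else:
--         picked = [s for s in stripped[start_idx:] if s][:count]
--     return "\n".join(picked)
-- ===== Notes on version B (the rewrite author's own statement) =====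
-- stated objective: simpler
-- what changed: B replaces A's stateful index-walking loop (per-step bounds check, early break at count, post-reversal) by staged whole-region passes: strip every line once, filter blanks in the directional region, and slice count items positionally ([-count:] backward, [:count] forward).
import Mathlib
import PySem

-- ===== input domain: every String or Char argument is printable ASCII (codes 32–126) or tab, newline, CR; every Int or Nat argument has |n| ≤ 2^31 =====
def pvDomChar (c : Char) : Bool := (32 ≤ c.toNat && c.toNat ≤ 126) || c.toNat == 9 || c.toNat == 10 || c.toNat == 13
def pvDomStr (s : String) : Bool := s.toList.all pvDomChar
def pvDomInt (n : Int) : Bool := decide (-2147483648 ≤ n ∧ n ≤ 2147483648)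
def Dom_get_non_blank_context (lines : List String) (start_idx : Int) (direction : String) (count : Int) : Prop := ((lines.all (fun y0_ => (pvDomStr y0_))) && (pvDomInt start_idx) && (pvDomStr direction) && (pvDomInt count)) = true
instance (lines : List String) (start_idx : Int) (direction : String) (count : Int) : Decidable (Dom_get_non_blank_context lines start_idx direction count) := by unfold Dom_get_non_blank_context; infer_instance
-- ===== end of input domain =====

-- B replaces A's stateful directional walk (early break, post-reversal) by staged whole-region
-- passes — strip all lines, filter blanks, slice count positionally; simpler, no speed claim.

-- ===== PORT A =====
-- the while loop of A: state (curr, result)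
def pvLoopA (lines : List String) (direction : String) (count : Int) (curr : Int) (result : List String) : List String :=
  if (result.length : Int) < count then
    if curr < 0 ∨ (lines.length : Int) ≤ curr then result
    else
      -- lines[curr]; the guard just above ensures 0 ≤ curr < len, so getD is never used
      let line := PySem.Str.strip ((PySem.List.pyGet? lines curr).getD "")
      let result' := if line ≠ "" then result ++ [line] else result
      if direction == "backward" then pvLoopA lines direction count (curr - 1) result'
      else pvLoopA lines direction count (curr + 1) result'
  else result
termination_by (if direction == "backward" then curr + 1 else (lines.length : Int) - curr).toNat
decreasing_by
  all_goals simp_all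

def get_non_blank_context (lines : List String) (start_idx : Int) (direction : String) (count : Int) : String :=
  let result := pvLoopA lines direction count start_idx []
  let result := if direction == "backward" then result.reverse else result
  PySem.Str.join "\n" result

-- ===== PORT B =====
def get_non_blank_context_alt (lines : List String) (start_idx : Int) (direction : String) (count : Int) : String :=
  if ¬ (0 ≤ start_idx ∧ start_idx < (lines.length : Int)) ∨ count ≤ 0 then ""
  else
    let stripped := lines.map PySem.Str.strip
    let picked :=
      if direction == "backward" then
        -- stripped[:start_idx+1]; exact as take since the guard gives 0 ≤ start_idx
        let c := (stripped.take (start_idx.toNat + 1)).filter (fun s => s ≠ "")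
        -- c[-count:]; exact as drop (len - count) since the guard gives 1 ≤ count
        c.drop (c.length - count.toNat)
      else
        -- stripped[start_idx:][:count]
        ((stripped.drop start_idx.toNat).filter (fun s => s ≠ "")).take count.toNat
    PySem.Str.join "\n" picked

-- ===== PRECONDITION & SPEC =====
def Spec_get_non_blank_context (lines : List String) (start_idx : Int) (direction : String) (count : Int) (out : String) : Prop := out = get_non_blank_context_alt lines start_idx direction count
instance (lines : List String) (start_idx : Int) (direction : String) (count : Int) (out : String) : Decidable (Spec_get_non_blank_context lines start_idx direction count out) := by unfold Spec_get_non_blank_context; infer_instance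

-- ===== CLAIM (what is proved, stated in full; the proofs are below) =====
def Claim_equal_get_non_blank_context : Prop := ∀ (lines : List String) (start_idx : Int) (direction : String) (count : Int), Dom_get_non_blank_context lines start_idx direction count → Spec_get_non_blank_context lines start_idx direction count (get_non_blank_context lines start_idx direction count)

-- ===== LEMMAS AND PROOFS =====

-- the stripped-and-filtered view of a region B computes
def pvF (l : List String) : List String := (l.map PySem.Str.strip).filter (fun s => s ≠ "")

lemma loopA_stop (lines : List String) (direction : String) (count : Int) (curr : Int)
    (result : List String) (h : ¬ (result.length : Int) < count) :
    pvLoopA lines direction count curr result = result := by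
  rw [pvLoopA]; simp [h]

lemma loopA_forward (lines : List String) (direction : String)
    (hd : (direction == "backward") = false) (count : Int) :
    ∀ (n : ℕ) (curr : Int) (res : List String), 0 ≤ curr → curr ≤ (lines.length : Int) →
      n = lines.length - curr.toNat → (res.length : Int) < count →
      pvLoopA lines direction count curr res
        = res ++ (pvF (lines.drop curr.toNat)).take (count - res.length).toNat := by
  intro n
  induction n with
  | zero =>
    intro curr res h0 hle hn hc
    have hcl : curr = (lines.length : Int) := by omega
    rw [pvLoopA]
    simp [hc, hcl, pvF, List.drop_eq_nil_of_le]
  | succ n ih =>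
    intro curr res h0 hle hn hc
    have hlt : curr < (lines.length : Int) := by omega
    have hnl : curr.toNat < lines.length := by omega
    rw [pvLoopA]
    have hget : (PySem.List.pyGet? lines curr).getD "" = lines[curr.toNat] := by
      rw [PySem.List.pyGet?_eq_some_getElem lines h0 hlt]; rfl
    have hdrop : lines.drop curr.toNat = lines[curr.toNat] :: lines.drop (curr.toNat + 1) :=
      List.drop_eq_getElem_cons hnl
    have hnext : ((curr + 1).toNat) = curr.toNat + 1 := by omega
    have hnb : ¬ (curr < 0 ∨ (lines.length : Int) ≤ curr) := by omega
    rw [if_pos hc, if_neg hnb]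
    simp only [hget, hd, Bool.false_eq_true, if_false]
    rw [hdrop]
    by_cases hs : PySem.Str.strip lines[curr.toNat] = ""
    · rw [if_neg (not_not_intro hs)]
      have hFb : pvF (lines[curr.toNat] :: lines.drop (curr.toNat + 1))
          = pvF (lines.drop (curr.toNat + 1)) := by
        simp only [pvF, List.map_cons, List.filter_cons]
        simp [hs]
      rw [hFb, ih (curr + 1) res (by omega) (by omega) (by omega) hc, hnext]
    · rw [if_pos hs]
      have hFcons : pvF (lines[curr.toNat] :: lines.drop (curr.toNat + 1))
          = PySem.Str.strip lines[curr.toNat] :: pvF (lines.drop (curr.toNat + 1)) := by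
        simp only [pvF, List.map_cons, List.filter_cons]
        simp [hs]
      rw [hFcons]
      have htk : (count - res.length).toNat = ((count - (res.length + 1)).toNat) + 1 := by omega
      rw [htk, List.take_succ_cons]
      by_cases hcnt : ((res ++ [PySem.Str.strip lines[curr.toNat]]).length : Int) < count
      · rw [ih (curr + 1) _ (by omega) (by omega) (by omega) hcnt, hnext]
        simp
      · rw [loopA_stop _ _ _ _ _ hcnt]
        have : (count - ((res.length : Int) + 1)).toNat = 0 := by simp at hcnt; omega
        simp [this]

lemma loopA_backward (lines : List String) (direction : String)
    (hd : (direction == "backward") = true) (count : Int) :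
    ∀ (n : ℕ) (curr : Int) (res : List String), -1 ≤ curr → curr < (lines.length : Int) →
      n = (curr + 1).toNat → (res.length : Int) < count →
      pvLoopA lines direction count curr res
        = res ++ ((pvF (lines.take (curr + 1).toNat)).reverse).take (count - res.length).toNat := by
  intro n
  induction n with
  | zero =>
    intro curr res h0 hle hn hc
    have hcl : curr = -1 := by omega
    rw [pvLoopA]
    simp [hc, hcl, pvF]
  | succ n ih =>
    intro curr res h0 hle hn hc
    have h0' : 0 ≤ curr := by omega
    have hnl : curr.toNat < lines.length := by omega
    rw [pvLoopA]
    have hget : (PySem.List.pyGet? lines curr).getD "" = lines[curr.toNat] := by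
      rw [PySem.List.pyGet?_eq_some_getElem lines h0' hle]; rfl
    have htake : lines.take (curr + 1).toNat
        = lines.take curr.toNat ++ [lines[curr.toNat]] := by
      have h1 : (curr + 1).toNat = curr.toNat + 1 := by omega
      rw [h1, List.take_add_one, List.getElem?_eq_getElem hnl]
      simp
    have hnb : ¬ (curr < 0 ∨ (lines.length : Int) ≤ curr) := by omega
    have hprev : ((curr - 1) + 1).toNat = curr.toNat := by omega
    rw [if_pos hc, if_neg hnb]
    simp only [hget, hd, if_true]
    rw [htake]
    have hFapp : ∀ t : List String, pvF (t ++ [lines[curr.toNat]])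
        = pvF t ++ pvF [lines[curr.toNat]] := by
      intro t; simp [pvF]
    rw [hFapp]
    by_cases hs : PySem.Str.strip lines[curr.toNat] = ""
    · rw [if_neg (not_not_intro hs)]
      rw [ih (curr - 1) res (by omega) (by omega) (by omega) hc, hprev]
      have : pvF [lines[curr.toNat]] = [] := by simp [pvF, hs]
      simp [this]
    · rw [if_pos hs]
      have hFone : pvF [lines[curr.toNat]] = [PySem.Str.strip lines[curr.toNat]] := by
        simp [pvF, hs]
      rw [hFone, List.reverse_append]
      simp only [List.reverse_cons, List.reverse_nil, List.nil_append, List.singleton_append]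
      have htk : (count - res.length).toNat = ((count - (res.length + 1)).toNat) + 1 := by omega
      rw [htk, List.take_succ_cons]
      by_cases hcnt : ((res ++ [PySem.Str.strip lines[curr.toNat]]).length : Int) < count
      · rw [ih (curr - 1) _ (by omega) (by omega) (by omega) hcnt, hprev]
        simp
      · rw [loopA_stop _ _ _ _ _ hcnt]
        have : (count - ((res.length : Int) + 1)).toNat = 0 := by simp at hcnt; omega
        simp [this]

-- ===== VERDICT (by name: the statement is the Claim_ definition above) =====
theorem get_non_blank_context_spec : Claim_equal_get_non_blank_context := by
  intro lines start_idx direction count _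
  unfold Spec_get_non_blank_context get_non_blank_context get_non_blank_context_alt
  by_cases hdeg : ¬ (0 ≤ start_idx ∧ start_idx < (lines.length : Int)) ∨ count ≤ 0
  · rw [if_pos hdeg]
    have hres : pvLoopA lines direction count start_idx [] = [] := by
      rcases hdeg with hoob | hcnt
      · rw [pvLoopA]
        have : start_idx < 0 ∨ (lines.length : Int) ≤ start_idx := by omega
        simp [this]
      · exact loopA_stop _ _ _ _ _ (by simp; omega)
    simp only [hres]
    rcases Bool.eq_false_or_eq_true (direction == "backward") with hd | hd <;> simp [hd] <;> rfl
  · rw [if_neg hdeg]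
    push Not at hdeg
    obtain ⟨⟨h0, hlt⟩, hcnt⟩ := hdeg
    have hcz : (([] : List String).length : Int) < count := by simp; omega
    rcases Bool.eq_false_or_eq_true (direction == "backward") with hd | hd
    · rw [loopA_backward lines direction hd count (start_idx + 1).toNat start_idx []
        (by omega) hlt rfl hcz]
      have hnat : (start_idx + 1).toNat = start_idx.toNat + 1 := by omega
      have hc0 : (count - (([] : List String).length : Int)).toNat = count.toNat := by simp
      rw [hnat, hc0]
      simp only [List.nil_append, hd, if_true]
      rw [List.take_reverse, List.reverse_reverse]
      simp only [pvF]
      rw [← List.map_take]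
    · rw [loopA_forward lines direction hd count (lines.length - start_idx.toNat) start_idx []
        h0 (by omega) rfl hcz]
      have hc0 : (count - (([] : List String).length : Int)).toNat = count.toNat := by simp
      rw [hc0]
      simp only [List.nil_append, hd, Bool.false_eq_true, if_false]
      simp only [pvF]
      rw [← List.map_drop]
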